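-- pv_equiv track=rewrite | github.com/only4anonymous/OOTSM | lib/supervised/sga/scene_sayer_ode_three_stage.py | ensure_frames_consistency
-- ===== SOURCE A (Python) =====
-- def ensure_frames_consistency(future_objects_by_frame, future_frames):
--     """
--     确保future_objects_by_frame字典包含且仅包含future_frames中的所有帧。
--     - 对于缺少的帧，从最近的前一帧复制物体列表
--     - 对于多余的帧（不在future_frames中），将其删除
--
--     参数:
--         future_objects_by_frame (dict): {frame_idx -> list of objects}，当前预测的物体字典
--         future_frames (list): 需要预测的帧编号列表，按升序排列
--
--     返回:
--         dict: 修正后的物体字典，确保包含且仅包含future_frames中的帧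
--     """
--     if not future_frames:
--         return {}
--
--     # 按帧编号排序future_frames
--     sorted_frames = sorted(future_frames)
--
--     # 创建新字典存储结果
--     corrected_dict = {}
--
--     # 处理每一帧
--     for frame_idx in sorted_frames:
--         if frame_idx in future_objects_by_frame:
--             # 如果帧存在，直接复制
--             corrected_dict[frame_idx] = future_objects_by_frame[frame_idx]
--         else:
--             # 如果帧不存在，寻找最近的前一帧
--             prev_objects = []
--             # 查找已处理的帧中小于当前帧的最大帧
--             prev_frames = [f for f in corrected_dict.keys() if f < frame_idx]
--             if prev_frames:
--                 prev_frame = max(prev_frames)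
--                 prev_objects = corrected_dict[prev_frame]
--             # 如果没有前一帧但有后一帧，也可以使用它（这是一个备选方案）
--             elif future_objects_by_frame:
--                 # 找到future_objects_by_frame中最近的一帧
--                 available_frames = list(future_objects_by_frame.keys())
--                 nearest_frame = min(available_frames, key=lambda f: abs(f - frame_idx))
--                 prev_objects = future_objects_by_frame[nearest_frame]
--
--             # 将结果添加到修正后的字典
--             corrected_dict[frame_idx] = prev_objects
--
--     return corrected_dict
-- ===== SOURCE B (Python) =====
-- def ensure_frames_consistency(future_objects_by_frame, future_frames):
--     """Build the answer as a flat list of (frame, objects) pairs in one forward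
--     sweep carrying the current objects value, then turn it into a dict at the
--     end, so the result's keys are never rescanned for missing frames."""
--     if not future_frames:
--         return {}
--
--     frames = sorted(future_frames)
--
--     # objects for the first (smallest) frame
--     f0 = frames[0]
--     if f0 in future_objects_by_frame:
--         v = future_objects_by_frame[f0]
--     elif future_objects_by_frame:
--         nearest = min(future_objects_by_frame, key=lambda k: abs(k - f0))
--         v = future_objects_by_frame[nearest]
--     else:
--         v = []
--
--     out = [(f0, v)]
--     for f in frames[1:]:
--         if f in future_objects_by_frame:
--             v = future_objects_by_frame[f]
--         out.append((f, v))
--     return dict(out)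
-- ===== Notes on version B (the rewrite author's own statement) =====
-- stated objective: alternative
-- what changed: A rescans the result dict's keys (filter + max) for every missing frame; B makes one forward sweep that carries the current objects value, appends (frame, objects) pairs to a flat list and converts it to a dict once at the end, so the result's keys are never rescanned.
import Mathlib
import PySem

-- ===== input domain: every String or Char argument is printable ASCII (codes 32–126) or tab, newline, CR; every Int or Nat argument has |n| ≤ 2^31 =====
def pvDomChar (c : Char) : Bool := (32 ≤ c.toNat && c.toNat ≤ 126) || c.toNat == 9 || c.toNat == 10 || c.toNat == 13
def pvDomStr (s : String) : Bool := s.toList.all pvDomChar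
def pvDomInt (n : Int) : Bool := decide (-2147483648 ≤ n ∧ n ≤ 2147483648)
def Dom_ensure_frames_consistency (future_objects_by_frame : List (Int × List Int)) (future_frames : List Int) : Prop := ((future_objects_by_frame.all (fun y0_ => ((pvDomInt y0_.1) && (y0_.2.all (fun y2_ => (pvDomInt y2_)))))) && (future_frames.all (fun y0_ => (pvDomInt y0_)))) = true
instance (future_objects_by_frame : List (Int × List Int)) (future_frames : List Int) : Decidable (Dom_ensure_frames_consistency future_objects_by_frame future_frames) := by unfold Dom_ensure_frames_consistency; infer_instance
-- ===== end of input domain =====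

-- B replaces A's per-missing-frame rescan of the result dict's keys (filter + max)
-- by one forward sweep that carries the current objects value, appends
-- (frame, objects) pairs to a flat list and converts it to a dict once at the
-- end (objective: alternative).

-- ===== PORT A =====

-- A's else-branch when no previously processed frame is below frame_idx:
-- nearest frame of future_objects_by_frame by abs distance (first minimum), else [].
def fcFallbackA (d : PySem.Dict Int (List Int)) (f : Int) : List Int :=
  if d.items ≠ [] then
    let available_frames := d.keys
    let nearest := PySem.List.minD available_frames (fun k => |k - f|) 0
    (d.get? nearest).getD []
  else []

-- one iteration of A's `for frame_idx in sorted_frames` loop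
def fcStepA (d : PySem.Dict Int (List Int)) (acc : PySem.Dict Int (List Int)) (f : Int) :
    PySem.Dict Int (List Int) :=
  if d.contains f then
    acc.insert f ((d.get? f).getD [])
  else
    let prev_frames := acc.keys.filter (fun k => decide (k < f))
    let prev_objects :=
      if prev_frames ≠ [] then
        let prev_frame := PySem.List.maxD prev_frames (fun x => x) 0
        (acc.get? prev_frame).getD []
      else fcFallbackA d f
    acc.insert f prev_objects

def ensure_frames_consistency (future_objects_by_frame : List (Int × List Int)) (future_frames : List Int) : List (Int × List Int) :=
  if future_frames = [] then []
  else
    let d := PySem.Dict.ofList future_objects_by_frame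
    let sorted_frames := PySem.List.sorted future_frames (fun x => x)
    (sorted_frames.foldl (fcStepA d) ((PySem.Dict.empty : PySem.Dict Int (List Int)))).items

-- ===== PORT B =====

-- B's first-frame fallback: nearest frame of the input dict by abs distance, else [].
def fbNearest (d : PySem.Dict Int (List Int)) (f : Int) : List Int :=
  if d.items ≠ [] then
    let nearest := PySem.List.minD d.keys (fun k => |k - f|) 0
    (d.get? nearest).getD []
  else []

-- B's `for f in frames[1:]` loop: build the flat pair list, carrying the current value v
def fbBuild (d : PySem.Dict Int (List Int)) (v : List Int) : List Int → List (Int × List Int)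
  | [] => []
  | f :: rest =>
    let v' := if d.contains f then (d.get? f).getD [] else v
    (f, v') :: fbBuild d v' rest

def ensure_frames_consistency_alt (future_objects_by_frame : List (Int × List Int)) (future_frames : List Int) : List (Int × List Int) :=
  if future_frames = [] then []
  else
    let d := PySem.Dict.ofList future_objects_by_frame
    match PySem.List.sorted future_frames (fun x => x) with
    | [] => []  -- unreachable: future_frames ≠ []
    | f0 :: rest =>
      let v0 := if d.contains f0 then (d.get? f0).getD [] else fbNearest d f0
      (PySem.Dict.ofList ((f0, v0) :: fbBuild d v0 rest)).items

-- ===== PRECONDITION & SPEC =====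
def Spec_ensure_frames_consistency (future_objects_by_frame : List (Int × List Int)) (future_frames : List Int) (out : List (Int × List Int)) : Prop := out = ensure_frames_consistency_alt future_objects_by_frame future_frames
instance (future_objects_by_frame : List (Int × List Int)) (future_frames : List Int) (out : List (Int × List Int)) : Decidable (Spec_ensure_frames_consistency future_objects_by_frame future_frames out) := by unfold Spec_ensure_frames_consistency; infer_instance

-- ===== CLAIM (what is proved, stated in full; the proofs are below) =====
def Claim_equal_ensure_frames_consistency : Prop := ∀ (future_objects_by_frame : List (Int × List Int)) (future_frames : List Int), Dom_ensure_frames_consistency future_objects_by_frame future_frames → Spec_ensure_frames_consistency future_objects_by_frame future_frames (ensure_frames_consistency future_objects_by_frame future_frames)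

-- ===== LEMMAS AND PROOFS =====

-- proof-side intermediate: A's loop re-expressed as a single pass that remembers the
-- last processed (frame, objects); it mediates between A's rescanning fold and B's list build
def fcStepM (d : PySem.Dict Int (List Int))
    (s : PySem.Dict Int (List Int) × Option (Int × List Int)) (f : Int) :
    PySem.Dict Int (List Int) × Option (Int × List Int) :=
  let (acc, cur) := s
  let v :=
    if d.contains f then (d.get? f).getD []
    else match cur with
      | some (_, cv) => cv
      | none => fbNearest d f
  (acc.insert f v, some (f, v))

-- the invariant tying A's accumulator to the mediating state: `cur` is the last item of the
-- (strictly-key-ascending) result dict, and its stored value is exactly what A's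
-- rescan (max of smaller keys, else the nearest-frame fallback) recomputes for it
def fcInv (d acc : PySem.Dict Int (List Int)) (cur : Option (Int × List Int)) : Prop :=
  match cur with
  | none => acc = (PySem.Dict.empty : PySem.Dict Int (List Int))
  | some (cf, cv) => ∃ init,
      acc = PySem.Dict.mk (init ++ [(cf, cv)]) ∧
      ((init ++ [(cf, cv)]).map Prod.fst).Pairwise (· < ·) ∧
      cv = (if d.contains cf then (d.get? cf).getD []
            else (init.getLast?.map Prod.snd).getD (fbNearest d cf))

-- the value A's loop body stores for frame f
def fcAVal (d acc : PySem.Dict Int (List Int)) (f : Int) : List Int :=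
  if d.contains f then (d.get? f).getD []
  else
    let prev_frames := acc.keys.filter (fun k => decide (k < f))
    if prev_frames ≠ [] then
      (acc.get? (PySem.List.maxD prev_frames (fun x => x) 0)).getD []
    else fcFallbackA d f

-- the value the mediating pass stores for frame f
def fcMVal (d : PySem.Dict Int (List Int)) (cur : Option (Int × List Int)) (f : Int) :
    List Int :=
  if d.contains f then (d.get? f).getD []
  else match cur with
    | some (_, cv) => cv
    | none => fbNearest d f

theorem fcStepA_eq (d acc : PySem.Dict Int (List Int)) (f : Int) :
    fcStepA d acc f = acc.insert f (fcAVal d acc f) := by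
  unfold fcStepA fcAVal fcFallbackA
  split <;> rfl

theorem fcStepM_eq (d acc : PySem.Dict Int (List Int)) (cur : Option (Int × List Int))
    (f : Int) :
    fcStepM d (acc, cur) f = (acc.insert f (fcMVal d cur f), some (f, fcMVal d cur f)) := rfl

theorem fc_get?_of_mem_nodup (ps : List (Int × List Int)) (k : Int) (v : List Int)
    (hmem : (k, v) ∈ ps) (hnd : (ps.map Prod.fst).Nodup) :
    (PySem.Dict.mk ps).get? k = some v := by
  apply PySem.Dict.get?_of_mem_items (d := PySem.Dict.mk ps) hmem
  simpa [PySem.Dict.keys_mk] using hnd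

theorem fc_maxD_eq (xs : List Int) (m : Int) (hm : m ∈ xs) (hle : ∀ y ∈ xs, y ≤ m) :
    PySem.List.maxD xs (fun x => x) 0 = m := by
  have hne : xs ≠ [] := List.ne_nil_of_mem hm
  have h := PySem.List.max?_eq_some_maxD xs (fun x => x) 0 hne
  have hmm := PySem.List.max?_mem h
  have h1 : m ≤ PySem.List.maxD xs (fun x => x) 0 := PySem.List.max?_isMax h m hm
  exact le_antisymm (hle _ hmm) h1

theorem fc_contains_mk_false (ps : List (Int × List Int)) (f : Int)
    (h : ∀ k ∈ ps.map Prod.fst, k < f) :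
    (PySem.Dict.mk ps).contains f = false := by
  rw [PySem.Dict.contains_mk, List.any_eq_false]
  intro p hp
  have := h p.1 (List.mem_map_of_mem hp)
  simp only [beq_iff_eq]
  omega

theorem fc_insert_snoc (init : List (Int × List Int)) (cf : Int) (cv : List Int)
    (f : Int) (v : List Int)
    (h : ∀ k ∈ ((init ++ [(cf, cv)]).map Prod.fst), k < f) :
    (PySem.Dict.mk (init ++ [(cf, cv)])).insert f v
      = PySem.Dict.mk (init ++ [(cf, cv)] ++ [(f, v)]) := by
  apply PySem.Dict.ext
  rw [PySem.Dict.items_insert_of_not_contains _ _ (fc_contains_mk_false _ _ h)]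

theorem fc_insert_overwrite (init : List (Int × List Int)) (cf : Int) (cv : List Int)
    (v : List Int) (h : ∀ k ∈ init.map Prod.fst, k < cf) :
    (PySem.Dict.mk (init ++ [(cf, cv)])).insert cf v
      = PySem.Dict.mk (init ++ [(cf, v)]) := by
  have hc : (PySem.Dict.mk (init ++ [(cf, cv)])).contains cf = true := by
    rw [PySem.Dict.contains_mk, List.any_eq_true]
    exact ⟨(cf, cv), by simp⟩
  apply PySem.Dict.ext
  rw [PySem.Dict.items_insert_of_contains _ _ hc]
  show List.map _ (init ++ [(cf, cv)]) = init ++ [(cf, v)]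
  rw [List.map_append]
  congr 1
  · have hid : ∀ p ∈ init, (if (p.1 == cf) = true then ((cf, v) : Int × List Int) else p) = p := by
      intro p hp
      have := h p.1 (List.mem_map_of_mem hp)
      rw [if_neg]
      simp only [beq_iff_eq]
      omega
    rw [List.map_congr_left hid]
    simp
  · simp

theorem fc_ascend_le_getLast (ks : List Int) (h : ks.Pairwise (· < ·)) (hne : ks ≠ []) :
    ∀ y ∈ ks, y ≤ ks.getLast hne := by
  induction ks with
  | nil => simp
  | cons a ks ih =>
    rcases List.pairwise_cons.mp h with ⟨ha, hks⟩
    intro y hy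
    rcases List.mem_cons.mp hy with rfl | hy'
    · match ks, hks, ha with
      | [], _, _ => simp
      | b :: ks', hks, ha =>
        rw [List.getLast_cons (List.cons_ne_nil b ks')]
        exact le_of_lt (ha _ (List.getLast_mem _))
    · have hne' : ks ≠ [] := List.ne_nil_of_mem hy'
      rw [List.getLast_cons hne']
      exact ih hks hne' y hy'

-- the per-step value equality: under the invariant, A's rescan computes the carried value
theorem fc_val_eq (d acc : PySem.Dict Int (List Int)) (cur : Option (Int × List Int))
    (f : Int) (hinv : fcInv d acc cur)
    (hbd : ∀ p : Int × List Int, cur = some p → p.1 ≤ f) :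
    fcAVal d acc f = fcMVal d cur f := by
  unfold fcAVal fcMVal
  by_cases hc : d.contains f = true
  · simp [hc]
  · simp only [Bool.not_eq_true] at hc
    simp only [hc, Bool.false_eq_true, if_false]
    match cur with
    | none =>
      subst hinv
      simp [PySem.Dict.keys_empty, fcFallbackA, fbNearest]
    | some (cf, cv) =>
      obtain ⟨init, hacc, hpw, hcv⟩ := hinv
      subst hacc
      have hcf : cf ≤ f := hbd _ rfl
      have hinitlt : ∀ k ∈ init.map Prod.fst, k < cf := by
        rw [List.map_append] at hpw
        have := (List.pairwise_append.mp hpw).2.2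
        intro k hk; exact this k hk cf (by simp)
      have hkeys : (PySem.Dict.mk (init ++ [(cf, cv)]) : PySem.Dict Int (List Int)).keys
          = init.map Prod.fst ++ [cf] := by
        rw [PySem.Dict.keys_mk, List.map_append]; rfl
      rw [hkeys]
      by_cases hlt : cf < f
      · -- every key is < f: the filter keeps everything, max is cf, stored value cv
        have hfull : (init.map Prod.fst ++ [cf]).filter (fun k => decide (k < f))
            = init.map Prod.fst ++ [cf] := by
          apply List.filter_eq_self.mpr
          intro k hk
          rcases List.mem_append.mp hk with hk' | hk'
          · exact decide_eq_true (lt_trans (hinitlt k hk') hlt)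
          · simp only [List.mem_singleton] at hk'; subst hk'; exact decide_eq_true hlt
        rw [hfull]
        have hmax : PySem.List.maxD (init.map Prod.fst ++ [cf]) (fun x => x) 0 = cf := by
          apply fc_maxD_eq
          · simp
          · intro y hy
            rcases List.mem_append.mp hy with hy' | hy'
            · exact le_of_lt (hinitlt y hy')
            · simp only [List.mem_singleton] at hy'; omega
        have hget : (PySem.Dict.mk (init ++ [(cf, cv)]) : PySem.Dict Int (List Int)).get? cf
            = some cv := by
          apply fc_get?_of_mem_nodup
          · simp
          · exact hpw.imp (fun h => ne_of_lt h)
        rw [if_pos (by simp), hmax, hget]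
        rfl
      · -- cf = f: A recomputes from the smaller keys exactly what it stored as cv
        have hcf' : cf = f := le_antisymm hcf (not_lt.mp hlt)
        subst hcf'
        rw [if_neg (by simp [hc] : ¬ (d.contains cf = true))] at hcv
        have hfilt : (init.map Prod.fst ++ [cf]).filter (fun k => decide (k < cf))
            = init.map Prod.fst := by
          rw [List.filter_append]
          have h1 : (init.map Prod.fst).filter (fun k => decide (k < cf)) = init.map Prod.fst :=
            List.filter_eq_self.mpr (fun k hk => decide_eq_true (hinitlt k hk))
          have h2 : ([cf] : List Int).filter (fun k => decide (k < cf)) = [] := by simp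
          rw [h1, h2, List.append_nil]
        rw [hfilt]
        match hin : init with
        | [] => simp [fcFallbackA, fbNearest, hcv]
        | p :: rest =>
          have hne : ((p :: rest).map Prod.fst) ≠ [] := by simp
          have hne' : (p :: rest) ≠ [] := by simp
          set lk := ((p :: rest).map Prod.fst).getLast hne with hlk
          have hpwinit : ((p :: rest).map Prod.fst).Pairwise (· < ·) := by
            rw [List.map_append] at hpw
            exact (List.pairwise_append.mp hpw).1
          have hmax : PySem.List.maxD ((p :: rest).map Prod.fst) (fun x => x) 0 = lk := by
            apply fc_maxD_eq
            · exact List.getLast_mem hne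
            · exact fc_ascend_le_getLast _ hpwinit hne
          have hlast : ((p :: rest).getLast hne') ∈ (p :: rest) := List.getLast_mem hne'
          have hlkeq : lk = ((p :: rest).getLast hne').1 := by
            rw [hlk, List.getLast_map]
          have hget : (PySem.Dict.mk ((p :: rest) ++ [(cf, cv)]) : PySem.Dict Int (List Int)).get? lk
              = some ((p :: rest).getLast hne').2 := by
            rw [hlkeq]
            apply fc_get?_of_mem_nodup
            · exact List.mem_append_left _ hlast
            · exact hpw.imp (fun h => ne_of_lt h)
          rw [if_pos (by simp), hmax, hget, hcv]
          rw [List.getLast?_eq_some_getLast]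
          · simp
          · exact hne'

-- invariant preservation: the mediating pass's new state again satisfies the invariant
theorem fc_inv_step (d acc : PySem.Dict Int (List Int)) (cur : Option (Int × List Int))
    (f : Int) (hinv : fcInv d acc cur)
    (hbd : ∀ p : Int × List Int, cur = some p → p.1 ≤ f) :
    fcInv d (acc.insert f (fcMVal d cur f)) (some (f, fcMVal d cur f)) := by
  match cur with
  | none =>
    subst hinv
    refine ⟨[], ?_, by simp, ?_⟩
    · apply PySem.Dict.ext
      rw [PySem.Dict.items_insert_of_not_contains _ _ (by simp)]
      rfl
    · simp [fcMVal]
  | some (cf, cv) =>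
    obtain ⟨init, hacc, hpw, hcv⟩ := hinv
    subst hacc
    have hcf : cf ≤ f := hbd _ rfl
    have hinitlt : ∀ k ∈ init.map Prod.fst, k < cf := by
      rw [List.map_append] at hpw
      have := (List.pairwise_append.mp hpw).2.2
      intro k hk; exact this k hk cf (by simp)
    by_cases hlt : cf < f
    · -- f is a fresh key: items gain (f, v) at the end
      have hall : ∀ k ∈ ((init ++ [(cf, cv)]).map Prod.fst), k < f := by
        intro k hk
        rw [List.map_append] at hk
        rcases List.mem_append.mp hk with hk' | hk'
        · exact lt_trans (hinitlt k hk') hlt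
        · simp only [List.map_cons, List.map_nil, List.mem_singleton] at hk'; omega
      rw [fc_insert_snoc _ _ _ _ _ hall]
      refine ⟨init ++ [(cf, cv)], rfl, ?_, ?_⟩
      · rw [List.map_append]
        apply List.pairwise_append.mpr
        refine ⟨hpw, by simp, ?_⟩
        intro a ha b hb
        simp only [List.map_cons, List.map_nil, List.mem_singleton] at hb
        subst hb
        exact hall a ha
      · simp [fcMVal]
    · -- cf = f: the last item is overwritten in place, and the carried value cv
      -- is exactly what the invariant demands for the (unchanged) prefix
      have hcf' : cf = f := le_antisymm hcf (not_lt.mp hlt)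
      subst hcf'
      rw [fc_insert_overwrite _ _ _ _ hinitlt]
      refine ⟨init, rfl, ?_, ?_⟩
      · rw [List.map_append] at hpw ⊢
        simpa using hpw
      · unfold fcMVal
        by_cases hc : d.contains cf = true
        · simp [hc]
        · simp only [Bool.not_eq_true] at hc
          simp only [hc, Bool.false_eq_true, if_false] at hcv ⊢
          exact hcv

-- A's rescanning fold equals the mediating single pass
theorem fc_main (d : PySem.Dict Int (List Int)) (l : List Int)
    (hl : l.Pairwise (· ≤ ·))
    (acc : PySem.Dict Int (List Int)) (cur : Option (Int × List Int))
    (hinv : fcInv d acc cur)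
    (hbd : ∀ x ∈ l, ∀ p : Int × List Int, cur = some p → p.1 ≤ x) :
    l.foldl (fcStepA d) acc = (l.foldl (fcStepM d) (acc, cur)).1 := by
  induction l generalizing acc cur with
  | nil => rfl
  | cons f t ih =>
    rcases List.pairwise_cons.mp hl with ⟨hft, ht⟩
    simp only [List.foldl_cons]
    rw [fcStepA_eq, fcStepM_eq,
      fc_val_eq d acc cur f hinv (fun p hp => hbd f (by simp) p hp)]
    exact ih ht _ _
      (fc_inv_step d acc cur f hinv (fun p hp => hbd f (by simp) p hp))
      (fun x hx p hp => by
        cases hp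
        exact hft x hx)

-- the mediating pass, started after the first frame, is B's list build folded in by insert
theorem fc_build (d : PySem.Dict Int (List Int)) (l : List Int)
    (acc : PySem.Dict Int (List Int)) (cf : Int) (cv : List Int) :
    (l.foldl (fcStepM d) (acc, some (cf, cv))).1
      = (fbBuild d cv l).foldl (fun a (p : Int × List Int) => a.insert p.1 p.2) acc := by
  induction l generalizing acc cf cv with
  | nil => rfl
  | cons f t ih =>
    simp only [List.foldl_cons, fbBuild, fcStepM]
    exact ih _ _ _

-- ===== VERDICT (by name: the statement is the Claim_ definition above) =====
theorem ensure_frames_consistency_spec : Claim_equal_ensure_frames_consistency := by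
  intro fobf ff _
  unfold Spec_ensure_frames_consistency ensure_frames_consistency ensure_frames_consistency_alt
  by_cases hff : ff = []
  · simp [hff]
  · simp only [if_neg hff]
    have hsne : PySem.List.sorted ff (fun x => x) ≠ [] := by
      simpa [PySem.List.sorted_eq_nil_iff] using hff
    have hpw : (PySem.List.sorted ff (fun x => x)).Pairwise (· ≤ ·) := by
      simpa using PySem.List.sorted_pairwise ff (fun x => x)
    match hs : PySem.List.sorted ff (fun x => x) with
    | [] => exact absurd hs hsne
    | f0 :: rest =>
      rw [hs] at hpw
      rw [fc_main (PySem.Dict.ofList fobf) _ hpw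
        (PySem.Dict.empty : PySem.Dict Int (List Int)) none
        (by simp [fcInv]) (by simp)]
      simp only [List.foldl_cons]
      rw [show fcStepM (PySem.Dict.ofList fobf)
            ((PySem.Dict.empty : PySem.Dict Int (List Int)), none) f0
          = ((PySem.Dict.empty : PySem.Dict Int (List Int)).insert f0
              (fcMVal (PySem.Dict.ofList fobf) none f0),
             some (f0, fcMVal (PySem.Dict.ofList fobf) none f0)) from rfl]
      rw [fc_build]
      rfl
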